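-- pv_equiv track=rewrite | github.com/weicai-design/ai-stack-super-enhanced | 📚 Enhanced RAG & Knowledge Graph/processors/text_processors/intelligent-chunker.py | _find_safe_boundary
-- ===== SOURCE A (Python) =====
-- def _find_safe_boundary(text: str, start: int, proposed_end: int) -> int:
--     """在句子或单词边界处寻找安全的分块结束位置"""
--     # 首先尝试在句子边界处结束
--     sentence_end = proposed_end
--     while sentence_end > start and sentence_end < len(text):
--         if text[sentence_end] in ".!?。！？\n":
--             return sentence_end + 1
--         sentence_end -= 1
--
--     # 其次尝试在单词边界处结束（空格）
--     word_end = proposed_end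
--     while word_end > start and word_end < len(text):
--         if text[word_end].isspace():
--             return word_end + 1
--         word_end -= 1
--
--     return proposed_end
-- ===== SOURCE B (Python) =====
-- def _find_safe_boundary(text: str, start: int, proposed_end: int) -> int:
--     """Single backward scan: return immediately at a sentence boundary,
--     remember the first (nearest) whitespace seen for use if no sentence char is found."""
--     pos = proposed_end
--     first_space = None
--     n = len(text)
--     while pos > start and pos < n:
--         c = text[pos]
--         if c in ".!?。！？\n":
--             return pos + 1
--         if first_space is None and c.isspace():
--             first_space = pos
--         pos -= 1
--     if first_space is not None:
--         return first_space + 1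
--     return proposed_end
-- ===== Notes on version B (the rewrite author's own statement) =====
-- stated objective: alternative
-- what changed: The two sequential backward loops (sentence scan, then a second full whitespace scan) are fused into one backward scan that returns at once on a sentence character and records the first whitespace seen for the fallback.
import Mathlib
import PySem

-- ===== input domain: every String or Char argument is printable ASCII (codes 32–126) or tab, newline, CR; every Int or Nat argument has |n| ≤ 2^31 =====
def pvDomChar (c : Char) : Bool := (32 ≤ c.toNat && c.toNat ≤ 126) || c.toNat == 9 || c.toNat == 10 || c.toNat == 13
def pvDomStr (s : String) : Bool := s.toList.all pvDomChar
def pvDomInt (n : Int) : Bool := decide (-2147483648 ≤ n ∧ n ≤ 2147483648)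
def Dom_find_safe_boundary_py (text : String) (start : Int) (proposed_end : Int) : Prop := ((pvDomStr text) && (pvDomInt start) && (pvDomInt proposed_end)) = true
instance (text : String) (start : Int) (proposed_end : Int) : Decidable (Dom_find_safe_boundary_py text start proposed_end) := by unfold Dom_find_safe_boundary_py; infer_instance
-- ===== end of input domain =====

-- B fuses A's two sequential backward loops (sentence scan, then whitespace scan) into one
-- backward scan that records the first whitespace seen; single pass instead of up to two.


-- ===== PORT A =====
-- membership in the literal ".!?。！？\n"
def pvSentence (c : Char) : Bool :=
  c = '.' || c = '!' || c = '?' || c = '。' || c = '！' || c = '？' || c = '\n'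

-- first while-loop of A: scan for a sentence boundary
def pvLoop1 (cs : List Char) (start pos : Int) : Option Int :=
  if start < pos ∧ pos < (cs.length : Int) then
    match PySem.List.pyGet? cs pos with
    | some c => if pvSentence c then some (pos + 1) else pvLoop1 cs start (pos - 1)
    | none => some 0   -- Python raises IndexError here; excluded by Pre_, value arbitrary
  else none
termination_by (pos - start).toNat
decreasing_by omega

-- second while-loop of A: scan for whitespace
def pvLoop2 (cs : List Char) (start pos : Int) : Option Int :=
  if start < pos ∧ pos < (cs.length : Int) then
    match PySem.List.pyGet? cs pos with
    | some c => if PySem.Chars.isspace c then some (pos + 1) else pvLoop2 cs start (pos - 1)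
    | none => some 0   -- Python raises IndexError here; excluded by Pre_, value arbitrary
  else none
termination_by (pos - start).toNat
decreasing_by omega

def find_safe_boundary_py (text : String) (start : Int) (proposed_end : Int) : Int :=
  let cs := text.toList
  match pvLoop1 cs start proposed_end with
  | some r => r
  | none =>
    match pvLoop2 cs start proposed_end with
    | some r => r
    | none => proposed_end

-- ===== PORT B =====
-- B's single backward scan: return on a sentence char, remember the first whitespace seen
def pvLoopB (cs : List Char) (start pos : Int) (first_space : Option Int) : Option Int :=
  if start < pos ∧ pos < (cs.length : Int) then
    match PySem.List.pyGet? cs pos with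
    | some c =>
      if pvSentence c then some (pos + 1)
      else pvLoopB cs start (pos - 1)
        (if first_space.isNone && PySem.Chars.isspace c then some pos else first_space)
    | none => some 0   -- Python raises IndexError here; excluded by Pre_, value arbitrary
  else first_space.map (· + 1)
termination_by (pos - start).toNat
decreasing_by omega

def find_safe_boundary_py_alt (text : String) (start : Int) (proposed_end : Int) : Int :=
  match pvLoopB text.toList start proposed_end none with
  | some r => r
  | none => proposed_end

-- ===== PRECONDITION & SPEC =====
-- Pre_ excludes exactly the inputs on which A raises IndexError: the backward scan starts
-- below len(text), runs past index -len(text) (start < -len-1) and meets no sentence char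
-- on the valid wrapped positions it visits first.
def Pre_find_safe_boundary_py (text : String) (start : Int) (proposed_end : Int) : Prop :=
  ¬ (start < proposed_end ∧ proposed_end < (text.toList.length : Int) ∧
     start + text.toList.length + 1 < 0 ∧
     (text.toList.take (if 0 ≤ proposed_end then text.toList.length
                        else (↑text.toList.length + proposed_end + 1).toNat)).all
       (fun c => !pvSentence c) = true)
instance (text : String) (start : Int) (proposed_end : Int) : Decidable (Pre_find_safe_boundary_py text start proposed_end) := by unfold Pre_find_safe_boundary_py; infer_instance

def pvWitness_find_safe_boundary_py : String × Int × Int := ("ab cd.", 0, 4)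

def Spec_find_safe_boundary_py (text : String) (start : Int) (proposed_end : Int) (out : Int) : Prop := out = find_safe_boundary_py_alt text start proposed_end
instance (text : String) (start : Int) (proposed_end : Int) (out : Int) : Decidable (Spec_find_safe_boundary_py text start proposed_end out) := by unfold Spec_find_safe_boundary_py; infer_instance

-- ===== CLAIM (what is proved, stated in full; the proofs are below) =====
def Claim_equal_find_safe_boundary_py : Prop := ∀ (text : String) (start : Int) (proposed_end : Int), Dom_find_safe_boundary_py text start proposed_end → Pre_find_safe_boundary_py text start proposed_end → Spec_find_safe_boundary_py text start proposed_end (find_safe_boundary_py text start proposed_end)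

-- ===== LEMMAS AND PROOFS =====

-- invariant of B's fused scan: it equals "A's sentence scan, else the recorded space, else A's space scan"
theorem pvLoopB_eq (cs : List Char) (start pos : Int) (fs : Option Int) :
    pvLoopB cs start pos fs =
      match pvLoop1 cs start pos with
      | some r => some r
      | none =>
        match fs with
        | some w => some (w + 1)
        | none => pvLoop2 cs start pos := by
  fun_induction pvLoopB cs start pos fs with
  | case1 pos fs h c hc hsent =>
    rw [pvLoop1]; simp [h, hc, hsent]
  | case2 pos fs h c hc hsent ih =>
    rw [pvLoop1, pvLoop2]; simp only [if_pos h, hc]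
    simp only [dite_eq_ite] at ih
    rw [ih]
    cases fs with
    | some w => simp [hsent]
    | none =>
      by_cases hsp : PySem.Chars.isspace c
      · simp [hsent, hsp]
      · simp [hsent, hsp]
  | case3 pos fs h hc =>
    rw [pvLoop1]; simp [h, hc]
  | case4 pos fs h =>
    rw [pvLoop1, pvLoop2]; simp [h]
    cases fs <;> simp [Option.map]

theorem pv_main (text : String) (start proposed_end : Int) :
    find_safe_boundary_py text start proposed_end =
      find_safe_boundary_py_alt text start proposed_end := by
  unfold find_safe_boundary_py find_safe_boundary_py_alt
  rw [pvLoopB_eq]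
  cases h : pvLoop1 text.toList start proposed_end <;> simp [h]

-- ===== VERDICT (by name: the statement is the Claim_ definition above) =====
theorem find_safe_boundary_py_spec : Claim_equal_find_safe_boundary_py := by
  intro text start proposed_end _ _
  unfold Spec_find_safe_boundary_py
  exact pv_main text start proposed_end
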